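-- pv_equiv track=rewrite | github.com/mosaicml/streaming | streaming/shuffle/py1s.py | divide_spans
-- ===== SOURCE A (Python) =====
-- from typing import List, Tuple
--
-- def divide_spans(spans: List[Tuple[int, int]], num_samples: int, num_parts: int) -> \
--         Tuple[List[Tuple[int, int]], List[Tuple[int, int]]]:
--     """Divide the spans into discrete, equal sized partitions.
--
--     Don't use ``spans`` after this, as it is modified in-place for performance reasons.
--
--     Args:
--         spans (List[Tuple[int, int]]): List of spans to partition.
--         num_samples (int): Total number of samples across all spans.
--         num_parts (int): Number of groupings to divide spans into.
--
--     Returns: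
--         Tuple[List[Tuple, int, int]], List[Tuple[int, int]]]: Spans and super spans.
--     """
--     begin_part = 0
--     span_index = 0
--     samples_so_far = 0
--
--     out_spans = []
--     super_spans = []
--
--     for part in range(num_parts):
--         # note that the size of a part (canonical node) is num_samples // num_parts.
--         part_end = num_samples * (part + 1) // num_parts
--
--         # loop over spans until we've filled up our part (canonical node) completely
--         while True:
--             if span_index == len(spans):
--                 break
--
--             # input spans are the shard spans. these can be unequally sized and may cross
--             # part (canonical node) boundaries.
--             span = spans[span_index]
--             # spans are (begin, end excl)
--             samples_this_span = span[1] - span[0]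
--             # check if the shard span contains more samples than the part (canonical node) can fit
--             if part_end < samples_so_far + samples_this_span:
--                 # if there is space left in the part, split the span
--                 if samples_so_far < part_end:
--                     split = part_end - samples_so_far
--                     # create a span, filling up with as many samples as possible from shard span
--                     new_span = span[0], span[0] + split
--                     out_spans.append(new_span)
--                     # modify the old shard span to reflect that it's been split
--                     spans[span_index] = span[0] + split, span[1]
--                     samples_so_far += split
--                 break
--
--             out_spans.append(span)
--             span_index += 1
--             samples_so_far += samples_this_span
--
--         # super spans are tell us which new spans belong to each part (canonical node)
--         # as a tuple of (begin span index, end span index excl)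
--         super_span = begin_part, len(out_spans)
--         super_spans.append(super_span)
--         begin_part = len(out_spans)
--
--     return out_spans, super_spans
-- ===== SOURCE B (Python) =====
-- from typing import List, Tuple
--
-- def divide_spans(spans: List[Tuple[int, int]], num_samples: int, num_parts: int) -> \
--         Tuple[List[Tuple[int, int]], List[Tuple[int, int]]]:
--     """Divide the spans into discrete, equal sized partitions.
--
--     Single walk with spans as the outer loop: for each span, close as many
--     parts as it straddles (splitting at each part boundary), otherwise emit
--     it whole.  Unlike the original, ``spans`` is NOT mutated; the equivalence
--     is about the return value only.
--     """
--     out_spans: List[Tuple[int, int]] = []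
--     super_spans: List[Tuple[int, int]] = []
--     begin_part = 0
--     cursor = 0
--     part = 0
--
--     for begin, end in spans:
--         if part == num_parts:
--             break
--         while part < num_parts:
--             part_end = num_samples * (part + 1) // num_parts
--             if part_end < cursor + (end - begin):
--                 if cursor < part_end:
--                     out_spans.append((begin, begin + part_end - cursor))
--                     begin += part_end - cursor
--                     cursor = part_end
--                 super_spans.append((begin_part, len(out_spans)))
--                 begin_part = len(out_spans)
--                 part += 1
--             else:
--                 out_spans.append((begin, end))
--                 cursor += end - begin
--                 break
--
--     # remaining parts receive no (further) spans
--     for _ in range(part, num_parts):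
--         super_spans.append((begin_part, len(out_spans)))
--         begin_part = len(out_spans)
--
--     return out_spans, super_spans
-- ===== Notes on version B (the rewrite author's own statement) =====
-- stated objective: alternative
-- what changed: Inverts the loop nesting: instead of iterating over parts and scanning/splitting spans in an inner while over a mutable spans list with an index, B iterates once over the spans themselves, closing however many part boundaries each span straddles in an inner while and flushing the remaining empty parts afterwards; B does not mutate the spans argument (the original does, in place).
import Mathlib
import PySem

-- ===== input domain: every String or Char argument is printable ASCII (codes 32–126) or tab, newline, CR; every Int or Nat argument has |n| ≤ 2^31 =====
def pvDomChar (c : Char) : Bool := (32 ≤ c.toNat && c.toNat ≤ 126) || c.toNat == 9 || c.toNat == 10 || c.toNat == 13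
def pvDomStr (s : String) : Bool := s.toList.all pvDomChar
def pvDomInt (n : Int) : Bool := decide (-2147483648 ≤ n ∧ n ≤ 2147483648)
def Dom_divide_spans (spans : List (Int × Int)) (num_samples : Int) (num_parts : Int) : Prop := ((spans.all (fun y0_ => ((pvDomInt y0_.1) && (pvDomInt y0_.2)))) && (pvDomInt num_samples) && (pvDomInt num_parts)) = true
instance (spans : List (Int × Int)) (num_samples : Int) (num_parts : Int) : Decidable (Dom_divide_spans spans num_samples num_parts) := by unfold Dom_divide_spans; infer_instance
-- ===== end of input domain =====

-- B re-shapes the walk (spans become the outer loop, parts the inner one) and does not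
-- mutate `spans`; A mutates `spans` in place, so the equivalence proved here is about the
-- RETURN value only.

-- ===== PORT A =====
-- A's inner `while True` loop for one part: state (spans, span_index, samples_so_far, out_spans).
-- The final `else` branch is an unreachable totality guard (span_index never exceeds len(spans)).
-- `fuel` is only a structural totality guard (the loop advances span_index, so
-- `spans.length + 1` fuel is never exhausted); all other state is exactly A's.
def aInner (fuel : Nat) (spans : List (Int × Int)) (span_index : Nat) (samples_so_far : Int)
    (out : List (Int × Int)) (part_end : Int) :
    List (Int × Int) × Nat × Int × List (Int × Int) :=
  match fuel with
  | 0 => (spans, span_index, samples_so_far, out)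
  | fuel + 1 =>
    if span_index = spans.length then (spans, span_index, samples_so_far, out)
    else if h : span_index < spans.length then
      let span := spans[span_index]
      let samples_this_span := span.2 - span.1
      if part_end < samples_so_far + samples_this_span then
        if samples_so_far < part_end then
          let split := part_end - samples_so_far
          (spans.set span_index (span.1 + split, span.2), span_index,
           samples_so_far + split, out ++ [(span.1, span.1 + split)])
        else (spans, span_index, samples_so_far, out)
      else aInner fuel spans (span_index + 1) (samples_so_far + samples_this_span)
             (out ++ [span]) part_end
    else (spans, span_index, samples_so_far, out)

-- one iteration of A's `for part in range(num_parts)` loop: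
-- state (spans, span_index, samples_so_far, begin_part, out_spans, super_spans)
def aStep (num_samples num_parts : Int)
    (st : List (Int × Int) × Nat × Int × Int × List (Int × Int) × List (Int × Int))
    (part : Int) :
    List (Int × Int) × Nat × Int × Int × List (Int × Int) × List (Int × Int) :=
  match st with
  | (spans, span_index, samples_so_far, begin_part, out, sup) =>
    let part_end := PySem.Int.floordiv (num_samples * (part + 1)) num_parts
    match aInner (spans.length + 1) spans span_index samples_so_far out part_end with
    | (spans', span_index', samples_so_far', out') =>
      (spans', span_index', samples_so_far', (out'.length : Int), out',
       sup ++ [(begin_part, (out'.length : Int))])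

def divide_spans (spans : List (Int × Int)) (num_samples : Int) (num_parts : Int) :
    (List (Int × Int)) × (List (Int × Int)) :=
  let st := (PySem.List.pyRange 0 num_parts 1).foldl (aStep num_samples num_parts)
      (spans, 0, 0, 0, [], [])
  (st.2.2.2.2.1, st.2.2.2.2.2)

-- ===== PORT B =====
-- B's inner `while part < num_parts` loop for one span (begin, end) = (a, b):
-- returns (cursor, part, begin_part, out_spans, super_spans).
-- `fuel` is only a structural totality guard (the loop advances part, so
-- `num_parts.toNat + 1` fuel is never exhausted); all other state is exactly B's.
def bInner (fuel : Nat) (num_samples num_parts : Int) (a b cursor : Int) (part : Nat)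
    (begin_part : Int) (out sup : List (Int × Int)) :
    Int × Nat × Int × List (Int × Int) × List (Int × Int) :=
  match fuel with
  | 0 => (cursor, part, begin_part, out, sup)
  | fuel + 1 =>
    if (part : Int) < num_parts then
      let part_end := PySem.Int.floordiv (num_samples * ((part : Int) + 1)) num_parts
      if part_end < cursor + (b - a) then
        if cursor < part_end then
          let out' := out ++ [(a, a + (part_end - cursor))]
          bInner fuel num_samples num_parts (a + (part_end - cursor)) b part_end (part + 1)
            (out'.length : Int) out' (sup ++ [(begin_part, (out'.length : Int))])
        else
          bInner fuel num_samples num_parts a b cursor (part + 1)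
            (out.length : Int) out (sup ++ [(begin_part, (out.length : Int))])
      else (cursor + (b - a), part, begin_part, out ++ [(a, b)], sup)
    else (cursor, part, begin_part, out, sup)

-- B's trailing `for _ in range(part, num_parts)` flush loop
def bFlush (count : Nat) (begin_part : Int) (out sup : List (Int × Int)) :
    List (Int × Int) :=
  match count with
  | 0 => sup
  | n + 1 => bFlush n (out.length : Int) out (sup ++ [(begin_part, (out.length : Int))])

-- B's outer `for begin, end in spans` loop
def bOuter (num_samples num_parts : Int) (spans : List (Int × Int)) (cursor : Int)
    (part : Nat) (begin_part : Int) (out sup : List (Int × Int)) :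
    (List (Int × Int)) × (List (Int × Int)) :=
  match spans with
  | [] => (out, bFlush (num_parts.toNat - part) begin_part out sup)
  | (a, b) :: rest =>
    if (part : Int) = num_parts then (out, bFlush (num_parts.toNat - part) begin_part out sup)
    else
      match bInner (num_parts.toNat + 1) num_samples num_parts a b cursor part begin_part out sup with
      | (cursor', part', begin_part', out', sup') =>
        bOuter num_samples num_parts rest cursor' part' begin_part' out' sup'

def divide_spans_alt (spans : List (Int × Int)) (num_samples : Int) (num_parts : Int) :
    (List (Int × Int)) × (List (Int × Int)) :=
  bOuter num_samples num_parts spans 0 0 0 [] []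

-- ===== PRECONDITION & SPEC =====
def Spec_divide_spans (spans : List (Int × Int)) (num_samples : Int) (num_parts : Int) (out : (List (Int × Int)) × (List (Int × Int))) : Prop := out = divide_spans_alt spans num_samples num_parts
instance (spans : List (Int × Int)) (num_samples : Int) (num_parts : Int) (out : (List (Int × Int)) × (List (Int × Int))) : Decidable (Spec_divide_spans spans num_samples num_parts out) := by unfold Spec_divide_spans; infer_instance

-- ===== CLAIM (what is proved, stated in full; the proofs are below) =====
def Claim_equal_divide_spans : Prop := ∀ (spans : List (Int × Int)) (num_samples : Int) (num_parts : Int), Dom_divide_spans spans num_samples num_parts → Spec_divide_spans spans num_samples num_parts (divide_spans spans num_samples num_parts)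

-- ===== LEMMAS AND PROOFS =====

-- Reference small-step evaluator over the joint state (remaining spans — the head may be a
-- split remainder —, sample cursor, part, begin_part, out, sup); both ports equal it.
def T (ns np : Int) (spans : List (Int × Int)) (s : Int) (p : Nat) (beg : Int)
    (out sup : List (Int × Int)) : (List (Int × Int)) × (List (Int × Int)) :=
  if h : (p : Int) < np then
    match spans with
    | [] => T ns np [] s (p + 1) (out.length : Int) out (sup ++ [(beg, (out.length : Int))])
    | (a, b) :: rest =>
      let e := PySem.Int.floordiv (ns * ((p : Int) + 1)) np
      if e < s + (b - a) then
        if s < e then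
          T ns np ((a + (e - s), b) :: rest) e (p + 1)
            ((out ++ [(a, a + (e - s))]).length : Int) (out ++ [(a, a + (e - s))])
            (sup ++ [(beg, ((out ++ [(a, a + (e - s))]).length : Int))])
        else
          T ns np ((a, b) :: rest) s (p + 1) (out.length : Int) out
            (sup ++ [(beg, (out.length : Int))])
      else T ns np rest (s + (b - a)) p beg (out ++ [(a, b)]) sup
  else (out, sup)
termination_by (np.toNat - p) * (spans.length + 1) + spans.length
decreasing_by
  · simp only [List.length_nil]; omega
  · simp only [List.length_cons]
    have h1 : np.toNat - (p + 1) < np.toNat - p := by omega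
    have h2 := mul_lt_mul_of_pos_right h1 (show 0 < rest.length + 1 + 1 by omega)
    omega
  · simp only [List.length_cons]
    have h1 : np.toNat - (p + 1) < np.toNat - p := by omega
    have h2 := mul_lt_mul_of_pos_right h1 (show 0 < rest.length + 1 + 1 by omega)
    omega
  · simp only [List.length_cons]
    have h1 : 1 ≤ np.toNat - p := by omega
    have h2 : (np.toNat - p) * (rest.length + 1 + 1) = (np.toNat - p) * (rest.length + 1) + (np.toNat - p) := by ring
    omega

lemma T_nil (ns np : Int) : ∀ (k p : Nat) (s beg : Int) (out sup : List (Int × Int)),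
    k = np.toNat - p → T ns np [] s p beg out sup = (out, bFlush k beg out sup) := by
  intro k
  induction k with
  | zero =>
    intro p s beg out sup hk
    have h : ¬ ((p : Int) < np) := by omega
    rw [T]; simp [h, bFlush]
  | succ n ih =>
    intro p s beg out sup hk
    have h : (p : Int) < np := by omega
    rw [T]; simp only [dif_pos h]
    rw [ih (p + 1) _ _ _ _ (by omega), bFlush]

lemma T_not_lt (ns np : Int) (spans : List (Int × Int)) (s : Int) (p : Nat) (beg : Int)
    (out sup : List (Int × Int)) (h : ¬ ((p : Int) < np)) :
    T ns np spans s p beg out sup = (out, sup) := by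
  rw [T.eq_def]; simp [h]

lemma bInner_stop (fuel : Nat) (ns np a b s : Int) (p : Nat) (beg : Int)
    (out sup : List (Int × Int)) (h : ¬ ((p : Int) < np)) :
    bInner fuel ns np a b s p beg out sup = (s, p, beg, out, sup) := by
  cases fuel <;> simp [bInner, h]

lemma bInner_T (ns np : Int) (rest : List (Int × Int))
    (hrest : ∀ s p beg out sup, bOuter ns np rest s p beg out sup = T ns np rest s p beg out sup) :
    ∀ (fuel : Nat) (a b s : Int) (p : Nat) (beg : Int) (out sup : List (Int × Int)),
      np.toNat - p < fuel → (p : Int) < np →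
      T ns np ((a, b) :: rest) s p beg out sup =
        (match bInner fuel ns np a b s p beg out sup with
         | (s', p', beg', out', sup') => bOuter ns np rest s' p' beg' out' sup') := by
  intro fuel
  induction fuel with
  | zero => intro a b s p beg out sup hf hp; omega
  | succ n ih =>
    intro a b s p beg out sup hf hp
    rw [T, bInner]
    simp only [if_pos hp, dif_pos hp]
    set e := PySem.Int.floordiv (ns * ((p : Int) + 1)) np with he
    by_cases h1 : e < s + (b - a)
    · simp only [if_pos h1]
      by_cases h2 : s < e
      · simp only [if_pos h2]
        by_cases hp2 : ((p + 1 : Nat) : Int) < np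
        · rw [ih _ _ _ _ _ _ _ (by push_cast at hp2 ⊢; omega) hp2]
        · rw [T_not_lt _ _ _ _ _ _ _ _ hp2, bInner_stop _ _ _ _ _ _ _ _ _ _ hp2]
          rw [hrest, T_not_lt _ _ _ _ _ _ _ _ hp2]
      · simp only [if_neg h2]
        by_cases hp2 : ((p + 1 : Nat) : Int) < np
        · rw [ih _ _ _ _ _ _ _ (by push_cast at hp2 ⊢; omega) hp2]
        · rw [T_not_lt _ _ _ _ _ _ _ _ hp2, bInner_stop _ _ _ _ _ _ _ _ _ _ hp2]
          rw [hrest, T_not_lt _ _ _ _ _ _ _ _ hp2]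
    · simp only [if_neg h1]
      rw [hrest]

lemma B_eq_T (ns np : Int) (spans : List (Int × Int)) :
    ∀ (s : Int) (p : Nat) (beg : Int) (out sup : List (Int × Int)),
    bOuter ns np spans s p beg out sup = T ns np spans s p beg out sup := by
  induction spans with
  | nil =>
    intro s p beg out sup
    rw [bOuter, T_nil ns np (np.toNat - p) p _ _ _ _ rfl]
  | cons hd rest ih =>
    intro s p beg out sup
    obtain ⟨a, b⟩ := hd
    by_cases heq : (p : Int) = np
    · rw [bOuter]
      have h0 : np.toNat - p = 0 := by omega
      have hlt : ¬ ((p : Int) < np) := by omega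
      rw [T_not_lt _ _ _ _ _ _ _ _ hlt]
      simp [heq, h0, bFlush]
    · by_cases hp : (p : Int) < np
      · rw [bOuter]
        simp only [if_neg heq]
        rw [bInner_T ns np rest ih (np.toNat + 1) _ _ _ _ _ _ _ (by omega) hp]
      · rw [bOuter]
        simp only [if_neg heq]
        rw [bInner_stop _ _ _ _ _ _ _ _ _ _ hp]
        rw [ih, T_not_lt _ _ _ _ _ _ _ _ hp, T_not_lt _ _ _ _ _ _ _ _ hp]

lemma aInner_shape : ∀ (fuel : Nat) (spans : List (Int × Int)) (idx : Nat) (s : Int)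
    (out : List (Int × Int)) (e : Int), idx ≤ spans.length →
    (aInner fuel spans idx s out e).2.1 ≤ (aInner fuel spans idx s out e).1.length := by
  intro fuel
  induction fuel with
  | zero => intro spans idx s out e h; simpa [aInner] using h
  | succ n ih =>
    intro spans idx s out e h
    rw [aInner]
    by_cases h0 : idx = spans.length
    · simp [h0]
    · have h2 : idx < spans.length := by omega
      simp only [if_neg h0, dif_pos h2]
      by_cases h3 : e < s + (spans[idx].2 - spans[idx].1)
      · by_cases h4 : s < e
        · simp [h3, h4]; omega
        · simp [h3, h4]; omega
      · simp only [if_neg h3]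
        exact ih spans (idx + 1) _ _ e (by omega)

def afterPart (ns np : Int) (p : Nat) (beg : Int) (sup : List (Int × Int))
    (r : List (Int × Int) × Nat × Int × List (Int × Int)) :
    (List (Int × Int)) × (List (Int × Int)) :=
  T ns np (r.1.drop r.2.1) r.2.2.1 (p + 1) (r.2.2.2.length : Int) r.2.2.2
    (sup ++ [(beg, (r.2.2.2.length : Int))])

lemma aInner_T (ns np : Int) (p : Nat) (hp : (p : Int) < np) (beg : Int)
    (sup : List (Int × Int)) : ∀ (fuel : Nat) (spans : List (Int × Int)) (idx : Nat)
    (s : Int) (out : List (Int × Int)), idx ≤ spans.length → spans.length - idx < fuel →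
    T ns np (spans.drop idx) s p beg out sup =
      afterPart ns np p beg sup
        (aInner fuel spans idx s out (PySem.Int.floordiv (ns * ((p : Int) + 1)) np)) := by
  intro fuel
  induction fuel with
  | zero => intro spans idx s out hle hf; omega
  | succ n ih =>
    intro spans idx s out hle hf
    rw [aInner]
    set e := PySem.Int.floordiv (ns * ((p : Int) + 1)) np with he
    by_cases h0 : idx = spans.length
    · simp only [if_pos h0]
      have hnil : spans.drop idx = [] := by rw [h0]; simp
      rw [hnil, T]
      simp only [dif_pos hp, afterPart, hnil]
    · have h2 : idx < spans.length := by omega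
      simp only [if_neg h0, dif_pos h2]
      have hdrop : List.drop idx spans = spans[idx] :: List.drop (idx + 1) spans :=
        List.drop_eq_getElem_cons h2
      rw [hdrop, T]
      simp only [dif_pos hp, ← he]
      by_cases h3 : e < s + (spans[idx].2 - spans[idx].1)
      · simp only [if_pos h3]
        by_cases h4 : s < e
        · simp only [if_pos h4]
          have hset : (spans.set idx (spans[idx].1 + (e - s), spans[idx].2)).drop idx
              = (spans[idx].1 + (e - s), spans[idx].2) :: spans.drop (idx + 1) := by
            rw [List.drop_eq_getElem_cons (by simpa using h2), List.getElem_set_self,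
              List.drop_set_of_lt]
            omega
          have hs : s + (e - s) = e := by ring
          simp only [afterPart, hset, hs]
        · simp only [if_neg h4, afterPart, hdrop]
      · simp only [if_neg h3]
        rw [ih spans (idx + 1) _ _ (by omega) (by omega)]

lemma A_eq_T (ns np : Int) : ∀ (k p : Nat) (spans : List (Int × Int)) (idx : Nat)
    (s beg : Int) (out sup : List (Int × Int)), k = np.toNat - p → idx ≤ spans.length →
    (((PySem.List.pyRange (p : Int) np 1).foldl (aStep ns np)
        (spans, idx, s, beg, out, sup)).2.2.2.2.1,
     ((PySem.List.pyRange (p : Int) np 1).foldl (aStep ns np)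
        (spans, idx, s, beg, out, sup)).2.2.2.2.2)
      = T ns np (spans.drop idx) s p beg out sup := by
  intro k
  induction k with
  | zero =>
    intro p spans idx s beg out sup hk hle
    have h : ¬ ((p : Int) < np) := by omega
    have hr : PySem.List.pyRange (p : Int) np 1 = [] := by
      rw [PySem.List.pyRange_one]
      have h0 : (np - (p : Int)).toNat = 0 := by omega
      simp [h0]
    rw [hr, T_not_lt _ _ _ _ _ _ _ _ h]
    simp
  | succ n ih =>
    intro p spans idx s beg out sup hk hle
    have hp : (p : Int) < np := by omega
    rw [PySem.List.pyRange_one_cons hp]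
    simp only [List.foldl_cons]
    rw [aInner_T ns np p hp beg sup (spans.length + 1) spans idx s out hle (by omega)]
    simp only [aStep]
    have hsh := aInner_shape (spans.length + 1) spans idx s out
      (PySem.Int.floordiv (ns * ((p : Int) + 1)) np) hle
    rcases hA : aInner (spans.length + 1) spans idx s out
        (PySem.Int.floordiv (ns * ((p : Int) + 1)) np) with ⟨spans₁, idx₁, s₁, out₁⟩
    rw [hA] at hsh
    simp only [afterPart]
    have hcast : ((p : Int) + 1) = (((p + 1 : Nat) : Int)) := by push_cast; ring
    rw [hcast, ih (p + 1) spans₁ idx₁ s₁ _ out₁ _ (by omega) hsh]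

-- ===== VERDICT (by name: the statement is the Claim_ definition above) =====
theorem divide_spans_spec : Claim_equal_divide_spans := by
  intro spans ns np _
  unfold Spec_divide_spans divide_spans divide_spans_alt
  have hA := A_eq_T ns np np.toNat 0 spans 0 0 0 [] [] (by omega) (by omega)
  simp only [Nat.cast_zero, List.drop_zero] at hA
  rw [hA, B_eq_T]
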